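-- pv_equiv track=rewrite | github.com/ejovo13/ogr-opti | exploration.py | is_golomb_ruler
-- ===== SOURCE A (Python) =====
-- def dist(a: int, b: int) -> int:
--     return abs(a - b)
--
-- def is_golomb_ruler(sequence: list[int]) -> bool:
--     """Verify if a sequence of integers is a golomb ruler.
--
--     In order for a sequence to be a golomb ruler, the differences between all items must be distinct
--     """
--     # first assert that all the elements are non-negative
--     for el in sequence:
--         if el < 0:
--             return False
--
--     differences = set()
--
--     for (lhs_index, lhs) in enumerate(sequence):
--         for rhs in sequence[(lhs_index + 1):]:
--
--             difference = dist(lhs, rhs)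
--             # Check if the difference is distinct!
--             if difference in differences:
--                 return False
--             else:
--                 differences.add(difference)
--
--     return True
-- ===== SOURCE B (Python) =====
-- def is_golomb_ruler(sequence: list[int]) -> bool:
--     """Golomb-ruler check: sort all pairwise differences, then verify the sorted
--     run is strictly increasing (no adjacent equal values)."""
--     if any(el < 0 for el in sequence):
--         return False
--     diffs = sorted(abs(a - b)
--                    for i, a in enumerate(sequence)
--                    for b in sequence[i + 1:])
--     return all(x < y for x, y in zip(diffs, diffs[1:]))
-- ===== Notes on version B (the rewrite author's own statement) =====
-- stated objective: alternative
-- what changed: Replaces A's maintain-a-hash-set-with-early-exit membership test by a sort-then-scan: collect all pairwise absolute differences, sort them, and check the sorted list is strictly increasing (adjacent duplicates reveal a repeat).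
import Mathlib
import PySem

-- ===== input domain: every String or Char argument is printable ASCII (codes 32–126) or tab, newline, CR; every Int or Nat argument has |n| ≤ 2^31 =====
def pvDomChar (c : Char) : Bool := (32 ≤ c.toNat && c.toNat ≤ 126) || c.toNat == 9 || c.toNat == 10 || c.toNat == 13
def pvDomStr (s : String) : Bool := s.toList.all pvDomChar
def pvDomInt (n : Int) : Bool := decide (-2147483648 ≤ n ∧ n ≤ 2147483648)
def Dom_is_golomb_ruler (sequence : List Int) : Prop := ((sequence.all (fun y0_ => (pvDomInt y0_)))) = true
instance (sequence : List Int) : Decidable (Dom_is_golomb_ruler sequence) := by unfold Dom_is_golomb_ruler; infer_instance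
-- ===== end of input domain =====

-- B replaces A's incremental set-with-early-exit pair test by a sort-then-scan:
-- collect all pairwise absolute differences, sort them, and check the sorted list
-- is strictly increasing (alternative decomposition; same asymptotic cost class).


-- ===== PORT A =====
-- the helper dist(a, b) = abs(a - b)  ('pyDist': the name 'dist' is taken by Mathlib)
def pyDist (a b : Int) : Int := |a - b|

-- the first loop: 'for el in sequence: if el < 0: return False' (true = an early return fired)
def negLoop : List Int → Bool
  | [] => false
  | el :: rest => if el < 0 then true else negLoop rest

-- the inner 'for rhs in sequence[(lhs_index + 1):]' loop over the set state;
-- none = the early 'return False', some s = the updated set of differences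
def golombInner (lhs : Int) : List Int → PySem.Set Int → Option (PySem.Set Int)
  | [], s => some s
  | rhs :: rs, s =>
    let difference := pyDist lhs rhs
    if PySem.Set.contains s difference then none
    else golombInner lhs rs (PySem.Set.add s difference)

-- the outer 'for (lhs_index, lhs) in enumerate(sequence)' loop; at step lhs_index the
-- inner loop runs over sequence[(lhs_index + 1):], i.e. the tail after lhs
def golombOuter : List Int → PySem.Set Int → Bool
  | [], _ => true
  | lhs :: rest, s =>
    match golombInner lhs rest s with
    | none => false
    | some s' => golombOuter rest s'

def is_golomb_ruler (sequence : List Int) : Bool :=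
  if negLoop sequence then false
  else golombOuter sequence PySem.Set.empty

-- ===== PORT B =====
-- the generator (abs(a - b) for i, a in enumerate(sequence) for b in sequence[i+1:])
def allDiffs : List Int → List Int
  | [] => []
  | x :: rest => rest.map (fun y => |x - y|) ++ allDiffs rest

-- all(x < y for x, y in zip(diffs, diffs[1:])): adjacent pairs strictly increase
def strictlyIncr : List Int → Bool
  | [] => true
  | [_] => true
  | x :: y :: rest => x < y && strictlyIncr (y :: rest)

def is_golomb_ruler_alt (sequence : List Int) : Bool :=
  if sequence.any (fun el => el < 0) then false
  else strictlyIncr (PySem.List.sorted (allDiffs sequence) (fun x => x) false)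

-- ===== PRECONDITION & SPEC =====
def Spec_is_golomb_ruler (sequence : List Int) (out : Bool) : Prop := out = is_golomb_ruler_alt sequence
instance (sequence : List Int) (out : Bool) : Decidable (Spec_is_golomb_ruler sequence out) := by unfold Spec_is_golomb_ruler; infer_instance

-- ===== CLAIM (what is proved, stated in full; the proofs are below) =====
def Claim_equal_is_golomb_ruler : Prop := ∀ (sequence : List Int), Dom_is_golomb_ruler sequence → Spec_is_golomb_ruler sequence (is_golomb_ruler sequence)

-- ===== LEMMAS AND PROOFS =====

theorem set_contains_iff (s : List Int) (x : Int) :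
    PySem.Set.contains s x = true ↔ x ∈ s := by
  simp [PySem.Set.contains]

theorem negLoop_eq_any (l : List Int) : negLoop l = l.any (fun el => decide (el < 0)) := by
  induction l with
  | nil => rfl
  | cons x xs ih => by_cases h : x < 0 <;> simp [negLoop, h, ih]

theorem mem_foldl_add (xs s : List Int) (d : Int) :
    d ∈ xs.foldl PySem.Set.add s ↔ d ∈ s ∨ d ∈ xs := by
  induction xs generalizing s with
  | nil => simp
  | cons x xs ih =>
    simp only [List.foldl_cons, ih, PySem.Set.mem_add, List.mem_cons]
    tauto

theorem golombInner_good (lhs : Int) (rest : List Int) (s : PySem.Set Int)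
    (hnd : (rest.map (fun y => |lhs - y|)).Nodup)
    (hnew : ∀ d ∈ rest.map (fun y => |lhs - y|), d ∉ s) :
    golombInner lhs rest s = some ((rest.map (fun y => |lhs - y|)).foldl PySem.Set.add s) := by
  induction rest generalizing s with
  | nil => rfl
  | cons r rs ih =>
    simp only [List.map_cons, List.nodup_cons] at hnd
    have hns : (|lhs - r|) ∉ s := hnew _ (by simp)
    have hc : PySem.Set.contains s (|lhs - r|) = false := by
      rw [Bool.eq_false_iff]; intro hc'; exact hns ((set_contains_iff s _).mp hc')
    show (if PySem.Set.contains s (pyDist lhs r) then none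
          else golombInner lhs rs (PySem.Set.add s (pyDist lhs r))) = _
    rw [show pyDist lhs r = |lhs - r| from rfl, hc]
    simp only [Bool.false_eq_true, if_false, List.map_cons, List.foldl_cons]
    exact ih (PySem.Set.add s (|lhs - r|)) hnd.2
      (fun d hd => by
        rw [PySem.Set.mem_add]
        rintro (hds | hdx)
        · exact hnew d (List.mem_cons_of_mem _ hd) hds
        · exact hnd.1 (hdx ▸ hd))

theorem golombInner_bad (lhs : Int) (rest : List Int) (s : PySem.Set Int)
    (h : ¬ ((rest.map (fun y => |lhs - y|)).Nodup ∧
            ∀ d ∈ rest.map (fun y => |lhs - y|), d ∉ s)) :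
    golombInner lhs rest s = none := by
  induction rest generalizing s with
  | nil => exact absurd ⟨List.nodup_nil, by simp⟩ h
  | cons r rs ih =>
    show (if PySem.Set.contains s (pyDist lhs r) then none
          else golombInner lhs rs (PySem.Set.add s (pyDist lhs r))) = none
    by_cases hc : PySem.Set.contains s (pyDist lhs r) = true
    · rw [hc]; simp
    · rw [Bool.not_eq_true] at hc
      rw [hc]
      simp only [Bool.false_eq_true, if_false]
      have hns : (|lhs - r|) ∉ s := fun hm =>
        (Bool.eq_false_iff.mp hc) ((set_contains_iff s _).mpr hm)
      apply ih
      intro ⟨hnd, hnew⟩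
      apply h
      simp only [List.map_cons, List.nodup_cons]
      refine ⟨⟨?_, hnd⟩, ?_⟩
      · intro hm
        exact (hnew _ hm) (by rw [show pyDist lhs r = |lhs - r| from rfl,
          PySem.Set.mem_add]; right; rfl)
      · intro d hd
        rcases List.mem_cons.mp hd with hdr | hdr
        · exact hdr ▸ hns
        · intro hds
          exact (hnew d hdr) (by rw [PySem.Set.mem_add]; left; exact hds)

theorem golombOuter_iff (l : List Int) (s : PySem.Set Int) :
    golombOuter l s = true ↔ (allDiffs l).Nodup ∧ ∀ d ∈ allDiffs l, d ∉ s := by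
  induction l generalizing s with
  | nil => simp [golombOuter, allDiffs]
  | cons lhs rest ih =>
    by_cases hg : (rest.map (fun y => |lhs - y|)).Nodup ∧
        ∀ d ∈ rest.map (fun y => |lhs - y|), d ∉ s
    · rw [show golombOuter (lhs :: rest) s =
          golombOuter rest ((rest.map (fun y => |lhs - y|)).foldl PySem.Set.add s) by
        simp [golombOuter, golombInner_good lhs rest s hg.1 hg.2]]
      rw [ih]
      simp only [allDiffs, List.nodup_append, List.mem_append]
      constructor
      · rintro ⟨hnd, hall⟩
        have hall' : ∀ d ∈ allDiffs rest,
            d ∉ s ∧ d ∉ rest.map (fun y => |lhs - y|) := by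
          intro d hd
          have hm := hall d hd
          rw [mem_foldl_add] at hm
          exact ⟨fun h1 => hm (Or.inl h1), fun h2 => hm (Or.inr h2)⟩
        refine ⟨⟨hg.1, hnd, ?_⟩, ?_⟩
        · intro a ha b hb heq
          exact (hall' b hb).2 (heq ▸ ha)
        · intro d hd
          rcases hd with hd | hd
          · exact hg.2 d hd
          · exact (hall' d hd).1
      · rintro ⟨⟨-, hnd, hdisj⟩, hall⟩
        refine ⟨hnd, ?_⟩
        intro d hd
        rw [mem_foldl_add]
        rintro (hds | hdm)
        · exact (hall d (Or.inr hd)) hds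
        · exact hdisj d hdm d hd rfl
    · rw [show golombOuter (lhs :: rest) s = false by
        simp [golombOuter, golombInner_bad lhs rest s hg]]
      simp only [Bool.false_eq_true, false_iff]
      intro ⟨hnd, hall⟩
      apply hg
      simp only [allDiffs, List.nodup_append] at hnd
      exact ⟨hnd.1, fun d hd => hall d (by simp [allDiffs, hd])⟩

theorem strictlyIncr_iff_chain (l : List Int) :
    strictlyIncr l = true ↔ l.IsChain (· < ·) := by
  induction l with
  | nil => simp [strictlyIncr]
  | cons x xs ih =>
    cases xs with
    | nil => simp [strictlyIncr]
    | cons y ys =>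
      simp only [strictlyIncr, Bool.and_eq_true, decide_eq_true_eq,
        List.isChain_cons_cons, ih]

-- on a (≤)-sorted list, adjacent strict increase is exactly Nodup
theorem chain_lt_iff_nodup {l : List Int} (hs : l.Pairwise (· ≤ ·)) :
    l.IsChain (· < ·) ↔ l.Nodup := by
  rw [List.isChain_iff_pairwise]
  constructor
  · intro hlt
    exact hlt.imp (fun h => ne_of_lt h)
  · intro hnd
    exact (List.Pairwise.and hs hnd).imp (fun h => lt_of_le_of_ne h.1 h.2)

-- ===== VERDICT (by name: the statement is the Claim_ definition above) =====
theorem is_golomb_ruler_spec : Claim_equal_is_golomb_ruler := by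
  intro sequence _
  unfold Spec_is_golomb_ruler is_golomb_ruler is_golomb_ruler_alt
  rw [negLoop_eq_any]
  by_cases hneg : sequence.any (fun el => decide (el < 0)) = true
  · simp [hneg]
  · simp only [hneg, Bool.false_eq_true, if_false]
    have hperm : (PySem.List.sorted (allDiffs sequence) (fun x => x) false).Perm
        (allDiffs sequence) := PySem.List.sorted_perm _ _ _
    have hpw : (PySem.List.sorted (allDiffs sequence) (fun x => x) false).Pairwise
        (fun a b => a ≤ b) := PySem.List.sorted_pairwise _ _
    have hkey : strictlyIncr (PySem.List.sorted (allDiffs sequence) (fun x => x) false)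
        = true ↔ (allDiffs sequence).Nodup := by
      rw [strictlyIncr_iff_chain, chain_lt_iff_nodup hpw, hperm.nodup_iff]
    have hA : golombOuter sequence PySem.Set.empty = true ↔ (allDiffs sequence).Nodup := by
      rw [golombOuter_iff]
      simp [PySem.Set.empty]
    by_cases hnd : (allDiffs sequence).Nodup
    · rw [hA.mpr hnd, hkey.mpr hnd]
    · have h1 : golombOuter sequence PySem.Set.empty = false :=
        Bool.eq_false_iff.mpr (fun h => hnd (hA.mp h))
      have h2 : strictlyIncr (PySem.List.sorted (allDiffs sequence) (fun x => x) false)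
          = false := Bool.eq_false_iff.mpr (fun h => hnd (hkey.mp h))
      rw [h1, h2]
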